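/- GENERATED by farm/mkstatement.py from design/units.tsv (unit `GifFreeSavedImages.3`) and the assertions of Gif/Spec/Seg_GifFreeSavedImages.lean — do not edit.
   THE STATEMENT of the proof unit `GifFreeSavedImages.3`: segment 3 of `GifFreeSavedImages` (9 instructions; entries 0x107f87;
   exits ret; ranges 0x107f87-0x107fa5)
   takes each of its entry assertions to one of its exit assertions (`Gif.Spec.GifFreeSavedImages.Seg3`), given the contracts of its callees.
   What the names mean: ProgX/Base/Spec/Basic.lean (the shared hypotheses), Gif/Spec/Seg_GifFreeSavedImages.lean (the assertions). The theorem to prove: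
   `theorem GifFreeSavedImages_3_ok : Gif.Spec.GifFreeSavedImages_3.Statement`. -/
import Gif.Code
import Gif.Dec.All
import Gif.Labels
import Gif.Spec.Seg_GifFreeSavedImages
import ProgX.Base.Spec.Heap
namespace Gif.Spec.GifFreeSavedImages_3
open X86 X86.User Asan

/-- The statement of unit `GifFreeSavedImages.3`. -/
def Statement : Prop :=
  ∀ (Lay : Layout) (_hLay : Lay.hi = 0x1000000) (μ : Microarch) (_hμ : UserX.MicroOK μ) (u₀ : State)
    (_hcode : HasCodeNat Lay u₀ Gif.L.GifFreeSavedImages.entry Gif.Code.code_GifFreeSavedImages.nat Gif.L.GifFreeSavedImages.size)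
    (_h_free : ∀ (H : Heap) (rest : List Obj) (frames : List (Nat × FrameLayout)) (n : Nat), Calls Lay μ ProgX.Base.WayInv (ProgX.Base.conv u₀) ProgX.Base.L.free.entry (ProgX.Base.Spec.free.spec H rest frames n))
    (_h_asan_store8_noabort : Asan.SmallCheck Lay μ ProgX.Base.WayInv (ProgX.Base.CodeOK u₀) [.rax, .rcx, .rdx] 8 ProgX.Base.L.__asan_store8_noabort.entry),
    Gif.Spec.GifFreeSavedImages.Seg3 Lay μ u₀

end Gif.Spec.GifFreeSavedImages_3
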